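-- pv_equiv track=rewrite | github.com/xiaoyue10131748/Lalaine | analyzeUtils/getSenInfo.py | getBackTrace
-- ===== SOURCE A (Python) =====
-- def getBackTrace(index, content):
--     startPoint = None
--     endPoint = None
--     while index < len(content):
--         if content[index].strip().startswith("Backtrace:"):
--             startPoint = index
--             break
--         index += 1
--
--     if startPoint != None:
--         endPoint = startPoint
--         while endPoint < len(content) and content[endPoint] != "\n":
--             endPoint += 1
--     if startPoint != None and endPoint != None:
--         return "".join(content[startPoint:endPoint])
--     else:
--         return ""
-- ===== SOURCE B (Python) =====
-- def getBackTrace(index, content):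
--     result = []
--     for line in content[index:]:
--         if result:
--             if line == "\n":
--                 break
--             result.append(line)
--         elif line.strip().startswith("Backtrace:"):
--             result.append(line)
--     return "".join(result)
-- ===== Notes on version B (the rewrite author's own statement) =====
-- stated objective: simpler
-- what changed: A's two separate index-based while loops (find the marker, then re-scan for the terminating blank line) and a final slice+join are replaced by one single pass over content[index:] with a result accumulator whose non-emptiness serves as the 'started' flag.
-- outside the precondition, e.g. on getBackTrace(-1, ['Backtrace: a\n', 'b\n']): A returns 'Backtrace: a\nb\n', B returns ''
import Mathlib
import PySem

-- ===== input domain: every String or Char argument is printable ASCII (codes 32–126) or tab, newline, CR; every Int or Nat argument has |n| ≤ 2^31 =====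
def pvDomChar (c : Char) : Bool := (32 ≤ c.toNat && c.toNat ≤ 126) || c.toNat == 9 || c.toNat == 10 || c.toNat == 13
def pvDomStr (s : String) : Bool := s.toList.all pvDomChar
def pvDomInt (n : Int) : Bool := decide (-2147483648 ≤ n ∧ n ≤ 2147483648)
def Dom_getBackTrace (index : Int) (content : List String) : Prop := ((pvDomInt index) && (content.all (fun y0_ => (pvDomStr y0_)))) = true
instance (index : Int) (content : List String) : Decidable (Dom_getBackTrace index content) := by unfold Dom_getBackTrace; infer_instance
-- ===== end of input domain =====

-- B replaces A's two index-based while loops and slice+join by one single pass with an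
-- accumulator ('started' = accumulator non-empty); objective: simpler. Pre_ restricts to
-- index ≥ 0: for negative index A's negative-index wraparound rescans lines in an
-- accidental order (or raises IndexError when index < -len(content)).


-- ===== PORT A =====
-- first while loop: advance index until a line strips to something starting with "Backtrace:"
def gbtFind (content : List String) (index : Int) : Nat → Option Int
  | 0 => none
  | n+1 =>
    if index < (content.length : Int) then
      match PySem.List.pyGet? content index with
      | none => none   -- IndexError (excluded by Pre_)
      | some s =>
        if PySem.Str.startswith (PySem.Str.strip s) "Backtrace:" then some index
        else gbtFind content (index + 1) n
    else none

-- second while loop: advance endPoint until end of content or an exact "\n" line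
def gbtEnd (content : List String) (e : Int) : Nat → Int
  | 0 => e
  | n+1 =>
    if e < (content.length : Int) ∧ PySem.List.pyGet? content e ≠ some "\n" then
      gbtEnd content (e + 1) n
    else e

def getBackTrace (index : Int) (content : List String) : String :=
  match gbtFind content index ((content.length : Int) - index).toNat with
  | none => ""
  | some s =>
    let e := gbtEnd content s ((content.length : Int) - s).toNat
    PySem.Str.join "" (PySem.List.slice content (some s) (some e))

-- ===== PORT B =====
-- single pass with result accumulator; 'started' = result non-empty
def gbtScan : List String → List String → List String
  | [], result => result
  | l :: ls, result =>
    if result ≠ [] then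
      if l = "\n" then result else gbtScan ls (result ++ [l])
    else if PySem.Str.startswith (PySem.Str.strip l) "Backtrace:" then
      gbtScan ls (result ++ [l])
    else gbtScan ls result

def getBackTrace_alt (index : Int) (content : List String) : String :=
  PySem.Str.join "" (gbtScan (PySem.List.slice content (some index) none) [])

-- ===== PRECONDITION & SPEC =====
-- Pre_ excludes negative index, on which A still returns for -len ≤ index < 0: there Python's
-- negative-index wraparound makes A scan the tail suffix and then the whole list again, an
-- accidental order B does not reproduce; for index < -len(content) A raises IndexError.
def Pre_getBackTrace (index : Int) (content : List String) : Prop := 0 ≤ index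
instance (index : Int) (content : List String) : Decidable (Pre_getBackTrace index content) := by unfold Pre_getBackTrace; infer_instance
def pvWitness_getBackTrace : Int × List String := (0, ["Backtrace: x\n", "y\n"])

def Spec_getBackTrace (index : Int) (content : List String) (out : String) : Prop := out = getBackTrace_alt index content
instance (index : Int) (content : List String) (out : String) : Decidable (Spec_getBackTrace index content out) := by unfold Spec_getBackTrace; infer_instance

-- ===== CLAIM (what is proved, stated in full; the proofs are below) =====
def Claim_equal_getBackTrace : Prop := ∀ (index : Int) (content : List String), Dom_getBackTrace index content → Pre_getBackTrace index content → Spec_getBackTrace index content (getBackTrace index content)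

-- ===== LEMMAS AND PROOFS =====

-- the line predicate of the marker search
def pvPred (s : String) : Bool := PySem.Str.startswith (PySem.Str.strip s) "Backtrace:"

-- common specification: the extracted block of a list of lines
def pvSpecList : List String → List String
  | [] => []
  | l :: ls => if pvPred l then l :: ls.takeWhile (fun x => x != "\n") else pvSpecList ls

lemma gbtScan_started (ls r : List String) (h : r ≠ []) :
    gbtScan ls r = r ++ ls.takeWhile (fun x => x != "\n") := by
  induction ls generalizing r with
  | nil => simp [gbtScan]
  | cons l ls ih =>
    simp only [gbtScan, if_pos h, List.takeWhile]
    by_cases hl : l = "\n"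
    · simp [hl]
    · have : (l != "\n") = true := by simpa using hl
      rw [if_neg hl, this, ih (r ++ [l]) (by simp)]
      simp

lemma gbtScan_spec (ls : List String) : gbtScan ls [] = pvSpecList ls := by
  induction ls with
  | nil => rfl
  | cons l ls ih =>
    by_cases hp : pvPred l = true
    · simp only [gbtScan, pvSpecList, ne_eq, not_true_eq_false, if_false,
        if_pos (show PySem.Str.startswith (PySem.Str.strip l) "Backtrace:" = true by simpa [pvPred] using hp),
        if_pos hp, List.nil_append]
      exact gbtScan_started ls [l] (by simp)
    · simp only [gbtScan, pvSpecList, ne_eq, not_true_eq_false, if_false,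
        if_neg (show ¬ PySem.Str.startswith (PySem.Str.strip l) "Backtrace:" = true by simpa [pvPred] using hp),
        if_neg hp]
      exact ih

lemma pvPred_ne_newline {l : String} (h : pvPred l = true) : l ≠ "\n" := by
  intro he; subst he; exact absurd h (by decide)

lemma gbtEnd_spec (content : List String) :
    ∀ (n j : Nat), content.length - j = n →
      gbtEnd content (j : Int) n =
        ((j + ((content.drop j).takeWhile (fun x => x != "\n")).length : Nat) : Int) := by
  intro n
  induction n with
  | zero =>
    intro j hj
    have hle : content.length ≤ j := by omega
    simp [gbtEnd, List.drop_eq_nil_of_le hle]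
  | succ n ih =>
    intro j hj
    have hjlt : j < content.length := by omega
    have hget : PySem.List.pyGet? content (j : Int) = content[j]? := by
      simp [pysem]
    have hdrop : content.drop j = content[j] :: content.drop (j + 1) :=
      List.drop_eq_getElem_cons hjlt
    by_cases hnl : content[j] = "\n"
    · have : ¬((j : Int) < (content.length : Int) ∧
          PySem.List.pyGet? content (j : Int) ≠ some "\n") := by
        rw [hget]
        simp [List.getElem?_eq_getElem hjlt, hnl]
      simp only [gbtEnd, if_neg this]
      rw [hdrop]
      simp [List.takeWhile, hnl]
    · have hcond : ((j : Int) < (content.length : Int) ∧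
          PySem.List.pyGet? content (j : Int) ≠ some "\n") := by
        constructor
        · exact_mod_cast hjlt
        · rw [hget]; simp [List.getElem?_eq_getElem hjlt, hnl]
      simp only [gbtEnd, if_pos hcond]
      have h1 : ((j : Int) + 1) = ((j + 1 : Nat) : Int) := by push_cast; ring
      rw [h1, ih (j + 1) (by omega), hdrop]
      have : (content[j] != "\n") = true := by simpa using hnl
      simp [List.takeWhile, this]
      ring

lemma take_takeWhile_length {α : Type} (p : α → Bool) (xs : List α) :
    xs.take (xs.takeWhile p).length = xs.takeWhile p :=
  ((List.prefix_iff_eq_take).1 (List.takeWhile_prefix p)).symm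

lemma gbtA_spec (content : List String) :
    ∀ (n k : Nat), content.length - k = n →
      getBackTrace (k : Int) content = PySem.Str.join "" (pvSpecList (content.drop k)) := by
  intro n
  induction n with
  | zero =>
    intro k hk
    have hle : content.length ≤ k := by omega
    have hfuel : ((content.length : Int) - (k : Int)).toNat = 0 := by omega
    simp only [getBackTrace, hfuel, gbtFind, List.drop_eq_nil_of_le hle, pvSpecList]
    decide
  | succ n ih =>
    intro k hk
    have hklt : k < content.length := by omega
    have hfuel : ((content.length : Int) - (k : Int)).toNat = n + 1 := by omega
    have hget : PySem.List.pyGet? content (k : Int) = some content[k] := by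
      simp [pysem, List.getElem?_eq_getElem hklt]
    have hdrop : content.drop k = content[k] :: content.drop (k + 1) :=
      List.drop_eq_getElem_cons hklt
    by_cases hp : pvPred content[k] = true
    · -- marker found at position k
      have hfind : gbtFind content (k : Int) (n + 1) = some (k : Int) := by
        simp only [gbtFind, if_pos (show (k : Int) < (content.length : Int) by exact_mod_cast hklt), hget]
        rw [if_pos (by simpa [pvPred] using hp)]
      have hne : content[k] ≠ "\n" := pvPred_ne_newline hp
      have hnb : (content[k] != "\n") = true := by simpa using hne
      simp only [getBackTrace, hfuel, hfind]
      rw [← hk, gbtEnd_spec content (content.length - k) k rfl]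
      have hcast : ((k + ((content.drop k).takeWhile (fun x => x != "\n")).length : Nat) : Int)
          = (k : Int) + (((content.drop k).takeWhile (fun x => x != "\n")).length : Nat) := by
        push_cast; ring
      rw [hcast, PySem.List.slice_natCast_add, take_takeWhile_length]
      rw [hdrop]
      simp [pvSpecList, hp, List.takeWhile, hnb]
    · have hfind1 : gbtFind content (k : Int) (n + 1) = gbtFind content ((k : Int) + 1) n := by
        simp only [gbtFind, if_pos (show (k : Int) < (content.length : Int) by exact_mod_cast hklt), hget]
        rw [if_neg (by simpa [pvPred] using hp)]
      have h1 : ((k : Int) + 1) = ((k + 1 : Nat) : Int) := by push_cast; ring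
      have hfuel1 : ((content.length : Int) - ((k + 1 : Nat) : Int)).toNat = n := by omega
      have := ih (k + 1) (by omega)
      simp only [getBackTrace, hfuel1, hfuel, hfind1, h1] at this ⊢
      rw [this, hdrop]
      simp [pvSpecList, hp]

lemma gbtB_spec (content : List String) (k : Nat) :
    getBackTrace_alt (k : Int) content = PySem.Str.join "" (pvSpecList (content.drop k)) := by
  rw [getBackTrace_alt, PySem.List.slice_from_natCast, gbtScan_spec]

-- ===== VERDICT (by name: the statement is the Claim_ definition above) =====
theorem getBackTrace_spec : Claim_equal_getBackTrace := by
  intro index content _ hpre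
  unfold Spec_getBackTrace
  have hk : index = ((index.toNat : Nat) : Int) := (Int.toNat_of_nonneg hpre).symm
  rw [hk, gbtB_spec, gbtA_spec content (content.length - index.toNat) index.toNat rfl]
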